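-- pv_equiv track=rewrite | github.com/pypi-data/pypi-mirror-383 | packages/dexpi.specificator/dexpi_specificator-1.0.0rc14-py3-none-any.whl/dexpi/specificator/uom_handling/uom_reader.py | camel_to_normal
-- ===== SOURCE A (Python) =====
-- def camel_to_normal(text):
--
--     # TODO?
--     if text == 'pH':
--         return text
--
--     assert ' ' not in text, text
--     result = []
--     for char in text:
--         if char.isupper():
--             if result:
--                 result.append(' ')
--             char = char.lower()
--         result.append(char)
--     return ''.join(result)
-- ===== SOURCE B (Python) =====
-- def camel_to_normal(text):
--     # B: recursively split the text at uppercase boundaries into camel segments,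
--     # then lowercase each whole segment and join the segments with spaces.
--     if text == 'pH':
--         return text
--     assert ' ' not in text, text
--     return ' '.join(word.lower() for word in _camel_words(text))
--
--
-- def _camel_words(text):
--     # the first segment runs from index 0 up to the next uppercase letter;
--     # the rest of the segments come from recursing on the remainder
--     if not text:
--         return []
--     i = 1
--     while i < len(text) and not text[i].isupper():
--         i += 1
--     return [text[:i]] + _camel_words(text[i:])
-- ===== Notes on version B (the rewrite author's own statement) =====
-- stated objective: alternative
-- what changed: Replaces A's single stateful accumulator loop (insert-a-space-before-each-uppercase, lowercase that char) with a recursive two-phase shape: split the text into camel segments at uppercase boundaries, then lowercase each whole segment and ' '.join them; Pre_ excludes texts containing a space, on which A's assert raises AssertionError.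
import Mathlib
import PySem

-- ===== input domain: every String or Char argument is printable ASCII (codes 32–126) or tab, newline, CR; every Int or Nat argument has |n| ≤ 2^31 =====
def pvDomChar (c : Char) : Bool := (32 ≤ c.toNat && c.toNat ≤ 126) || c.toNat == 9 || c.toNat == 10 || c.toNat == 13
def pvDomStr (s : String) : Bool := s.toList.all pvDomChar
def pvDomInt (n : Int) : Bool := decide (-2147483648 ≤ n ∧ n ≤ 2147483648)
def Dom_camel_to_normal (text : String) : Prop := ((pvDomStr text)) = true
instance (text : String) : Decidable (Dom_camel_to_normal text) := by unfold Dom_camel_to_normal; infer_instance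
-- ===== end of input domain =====

-- B splits the text recursively into camel segments at uppercase boundaries and
-- joins the lowercased segments with spaces, instead of A's stateful
-- accumulator loop (objective: alternative); both assert ' ' not in text.

-- ===== PORT A =====
def camel_to_normal (text : String) : String :=
  if text == "pH" then text
  else
    -- (the assert raising on texts containing ' ' is excluded by Pre_)
    String.ofList (text.toList.foldl (fun result char =>
      if PySem.Chars.isupper char then
        (if result = [] then result else result ++ [' ']) ++ [PySem.Chars.lowerChar char]
      else
        result ++ [char]) [])

-- ===== PORT B =====
-- _camel_words: the while loop scans past the leading run of non-uppercase
-- characters of text[1:], so text[:i] is the head char plus that run and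
-- text[i:] is the rest (= takeWhile / dropWhile of the tail).
def pvCamelWords : List Char → List (List Char)
  | [] => []
  | c :: rest =>
      (c :: rest.takeWhile (fun ch => !(PySem.Chars.isupper ch))) ::
      pvCamelWords (rest.dropWhile (fun ch => !(PySem.Chars.isupper ch)))
termination_by cs => cs.length
decreasing_by
  simp only [List.length_cons]
  exact Nat.lt_succ_of_le (List.length_dropWhile_le _ _)

def camel_to_normal_alt (text : String) : String :=
  if text == "pH" then text
  else
    -- ' '.join(word.lower() for word in _camel_words(text))
    String.ofList (PySem.Chars.join [' ']
      ((pvCamelWords text.toList).map PySem.Chars.lower))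

-- ===== PRECONDITION & SPEC =====
-- A's assert raises AssertionError on any text containing ' ' (other than the
-- early-returned literal "pH", which contains none anyway): exactly those
-- inputs are excluded.
def Pre_camel_to_normal (text : String) : Prop := ' ' ∉ text.toList
instance (text : String) : Decidable (Pre_camel_to_normal text) := by unfold Pre_camel_to_normal; infer_instance
def pvWitness_camel_to_normal : String := "helloBigWorld"

def Spec_camel_to_normal (text : String) (out : String) : Prop := out = camel_to_normal_alt text
instance (text : String) (out : String) : Decidable (Spec_camel_to_normal text out) := by unfold Spec_camel_to_normal; infer_instance

-- ===== CLAIM (what is proved, stated in full; the proofs are below) =====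
def Claim_equal_camel_to_normal : Prop := ∀ (text : String), Dom_camel_to_normal text → Pre_camel_to_normal text → Spec_camel_to_normal text (camel_to_normal text)

-- ===== LEMMAS AND PROOFS =====

-- dropWhile's first survivor fails the predicate
theorem pvDropWhile_head {α : Type} (p : α → Bool) (l : List α) (u : α) (rest : List α)
    (h : l.dropWhile p = u :: rest) : p u = false := by
  induction l with
  | nil => simp at h
  | cons a l ih =>
    rw [List.dropWhile_cons] at h
    by_cases hpa : p a = true
    · rw [if_pos hpa] at h; exact ih h
    · rw [if_neg hpa] at h
      cases h
      simpa using hpa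

-- the piece a non-leading character contributes to A's accumulator
def pvPiece (ch : Char) : List Char :=
  if PySem.Chars.isupper ch then [' ', PySem.Chars.lowerChar ch] else [ch]

-- A's loop, restarted from a nonempty accumulator, appends exactly the pieces
theorem pvFoldl_nonempty (cs : List Char) (acc : List Char) (h : acc ≠ []) :
    cs.foldl (fun result char =>
      if PySem.Chars.isupper char then
        (if result = [] then result else result ++ [' ']) ++ [PySem.Chars.lowerChar char]
      else result ++ [char]) acc = acc ++ cs.flatMap pvPiece := by
  induction cs generalizing acc with
  | nil => simp
  | cons c cs ih =>
    simp only [List.foldl_cons, List.flatMap_cons, pvPiece]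
    by_cases hu : PySem.Chars.isupper c = true
    · rw [if_pos hu, if_neg h, ih _ (by simp), if_pos hu]
      simp
    · rw [if_neg hu, ih _ (by simp [h]), if_neg hu]
      simp

theorem pvLower_nonupper (c : Char) (h : PySem.Chars.isupper c = false) :
    PySem.Chars.lowerChar c = c := by
  simp [PySem.Chars.lowerChar, h]

-- pieces of a run of non-uppercase characters are the characters themselves
theorem pvFlatMap_nonupper (w : List Char) (h : ∀ c ∈ w, PySem.Chars.isupper c = false) :
    w.flatMap pvPiece = w := by
  induction w with
  | nil => simp
  | cons c w ih =>
    rw [List.flatMap_cons, pvPiece, if_neg (by simp [h c List.mem_cons_self]),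
      ih fun x hx => h x (List.mem_cons_of_mem _ hx)]
    simp

-- a non-uppercase run lowercases to itself
theorem pvLower_run (w : List Char) (h : ∀ c ∈ w, PySem.Chars.isupper c = false) :
    PySem.Chars.lower w = w := by
  unfold PySem.Chars.lower
  induction w with
  | nil => simp
  | cons c w ih =>
    simp [pvLower_nonupper c (h c List.mem_cons_self),
      ih fun x hx => h x (List.mem_cons_of_mem _ hx)]

-- the core correspondence: A's head-piece plus tail-pieces is B's joined words
theorem pvCore (cs : List Char) (c : Char) :
    (if PySem.Chars.isupper c then [PySem.Chars.lowerChar c] else [c]) ++ cs.flatMap pvPiece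
      = PySem.Chars.join [' '] ((pvCamelWords (c :: cs)).map PySem.Chars.lower) := by
  induction hn : cs.length using Nat.strong_induction_on generalizing cs c with
  | _ n ih =>
  rw [pvCamelWords]
  set p : Char → Bool := fun ch => !(PySem.Chars.isupper ch) with hp
  have hsplit : cs.takeWhile p ++ cs.dropWhile p = cs := List.takeWhile_append_dropWhile
  have htw : ∀ x ∈ cs.takeWhile p, PySem.Chars.isupper x = false := by
    intro x hx
    have := List.mem_takeWhile_imp hx
    simpa [hp] using this
  have hhead : (if PySem.Chars.isupper c then [PySem.Chars.lowerChar c] else [c])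
      = [PySem.Chars.lowerChar c] := by
    by_cases hu : PySem.Chars.isupper c = true
    · simp [hu]
    · simp [hu, pvLower_nonupper c (by simpa using hu)]
  have hflat : cs.flatMap pvPiece
      = cs.takeWhile p ++ (cs.dropWhile p).flatMap pvPiece := by
    conv_lhs => rw [← hsplit]
    rw [List.flatMap_append, pvFlatMap_nonupper _ htw]
  have hlowerWord : PySem.Chars.lower (c :: cs.takeWhile p)
      = PySem.Chars.lowerChar c :: cs.takeWhile p := by
    unfold PySem.Chars.lower
    simp only [List.map_cons]
    have := pvLower_run (cs.takeWhile p) htw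
    unfold PySem.Chars.lower at this
    rw [this]
  cases hd : cs.dropWhile p with
  | nil =>
    simp only [hd, pvCamelWords, List.map_cons, List.map_nil, hflat, hd,
      List.flatMap_nil, List.append_nil, hhead, hlowerWord]
    simp [PySem.Chars.join, List.intercalate]
  | cons u rest =>
    have hu : PySem.Chars.isupper u = true := by
      have h1 := pvDropWhile_head p cs u rest hd
      simpa [hp] using h1
    have hlen : rest.length < n := by
      have h1 : (cs.dropWhile p).length ≤ cs.length := List.length_dropWhile_le _ _
      rw [hd] at h1
      simp only [List.length_cons] at h1
      omega
    have hih := ih rest.length hlen rest u rfl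
    rw [hhead, hflat, hd, List.flatMap_cons, List.map_cons, hlowerWord, pvCamelWords]
    rw [List.map_cons, PySem.Chars.join_cons_cons, ← List.map_cons, ← pvCamelWords, ← hih]
    simp [pvPiece, hu]

theorem camel_to_normal_spec : Claim_equal_camel_to_normal := by
  intro text _hdom _hpre
  unfold Spec_camel_to_normal camel_to_normal camel_to_normal_alt
  by_cases hpH : text == "pH"
  · simp [hpH]
  · simp only [hpH, Bool.false_eq_true, if_false]
    cases hcs : text.toList with
    | nil => simp [pvCamelWords, PySem.Chars.join, List.intercalate]
    | cons c cs =>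
      rw [List.foldl_cons]
      by_cases hu : PySem.Chars.isupper c = true
      · rw [if_pos hu, if_pos rfl, List.nil_append,
          pvFoldl_nonempty cs [PySem.Chars.lowerChar c] (by simp)]
        rw [show [PySem.Chars.lowerChar c]
            = (if PySem.Chars.isupper c then [PySem.Chars.lowerChar c] else [c]) by simp [hu]]
        rw [pvCore cs c]
      · rw [if_neg hu, List.nil_append, pvFoldl_nonempty cs [c] (by simp)]
        rw [show [c] = (if PySem.Chars.isupper c then [PySem.Chars.lowerChar c] else [c]) by
          simp [hu]]
        rw [pvCore cs c]
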